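-- pv_equiv track=rewrite | github.com/ylu1997/ylu1997.github.io | Only3000/Original_Work/enc_dec.py | lcs_distance
-- ===== SOURCE A (Python) =====
-- def lcs_distance(s1, s2):
--     m, n = len(s1), len(s2)
--     dp = [[0] * (n + 1) for _ in range(m + 1)]
--     for i in range(1, m + 1):
--         for j in range(1, n + 1):
--             if s1[i - 1] == s2[j - 1]:
--                 dp[i][j] = dp[i - 1][j - 1] + 1
--             else:
--                 dp[i][j] = max(dp[i - 1][j], dp[i][j - 1])
--
--     return n + m - 2 * dp[m][n]
-- ===== SOURCE B (Python) =====
-- def lcs_distance(s1, s2):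
--     # Top-down, demand-driven evaluation of the LCS recurrence: an explicit
--     # stack of (i, j, ready) work items with a memo dict, instead of A's
--     # bottom-up (m+1)x(n+1) table.  An item is first expanded (ready=False):
--     # its needed subproblems are pushed above it; when it resurfaces
--     # (ready=True) those are memoized and its value is computed.
--     m, n = len(s1), len(s2)
--     memo = {}
--
--     def val(i, j):
--         return 0 if i == 0 or j == 0 else memo.get((i, j))
--
--     stack = [(m, n, False)]
--     while stack:
--         i, j, ready = stack.pop()
--         if val(i, j) is not None:
--             continue
--         if not ready:
--             stack.append((i, j, True))
--             if s1[i - 1] == s2[j - 1]: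
--                 stack.append((i - 1, j - 1, False))
--             else:
--                 stack.append((i - 1, j, False))
--                 stack.append((i, j - 1, False))
--         else:
--             if s1[i - 1] == s2[j - 1]:
--                 memo[(i, j)] = val(i - 1, j - 1) + 1
--             else:
--                 a = val(i - 1, j)
--                 b = val(i, j - 1)
--                 memo[(i, j)] = a if a > b else b
--     return n + m - 2 * val(m, n)
-- ===== Notes on version B (the rewrite author's own statement) =====
-- stated objective: alternative
-- what changed: B evaluates the LCS recurrence top-down and demand-driven -- an explicit work stack of (i,j,ready) items with a memo dict keyed by index pairs -- instead of A's bottom-up fill of the full (m+1)x(n+1) table with nested loops.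
import Mathlib
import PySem

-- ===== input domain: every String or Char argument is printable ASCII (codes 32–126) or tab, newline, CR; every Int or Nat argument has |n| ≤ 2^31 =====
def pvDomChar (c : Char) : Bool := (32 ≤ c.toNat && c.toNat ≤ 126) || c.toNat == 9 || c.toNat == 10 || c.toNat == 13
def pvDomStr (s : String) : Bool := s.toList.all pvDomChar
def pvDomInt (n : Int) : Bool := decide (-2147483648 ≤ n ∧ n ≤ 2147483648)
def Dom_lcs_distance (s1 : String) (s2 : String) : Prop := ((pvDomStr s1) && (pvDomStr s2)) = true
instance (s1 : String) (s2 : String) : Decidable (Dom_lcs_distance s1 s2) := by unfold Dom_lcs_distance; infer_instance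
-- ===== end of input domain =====

-- B replaces A's bottom-up (m+1)×(n+1) table with a top-down, demand-driven evaluation of the
-- same recurrence: an explicit work stack of (i, j, ready) items and a memo dict (objective:
-- alternative decomposition, not speed).

-- ===== PORT A =====
-- inner loop of A for row i: walks j = 1..n over `rest` (the remaining chars of s2); `prev` is
-- the suffix of row i-1 starting at column j-1 (head = dp[i-1][j-1], head of tail = dp[i-1][j]);
-- `left` is dp[i][j-1] of the row being built.
def goA (c1 : Char) : List Char → List Int → Int → List Int
  | [], _, _ => []
  | _ :: _, [], _ => []          -- unreachable: prev row always has one more entry than rest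
  | c2 :: cs, pd :: rs, left =>
      let v := if c1 = c2 then pd + 1 else max (rs.headD 0) left
      v :: goA c1 cs rs v

-- A: build the whole table row by row (dp[i][0] = 0 stays from the zero initialisation),
-- then read dp[m][n]: the last entry (index n) of the last row (index m).
def lcs_distance (s1 : String) (s2 : String) : Int :=
  let l1 := s1.toList
  let l2 := s2.toList
  let m := l1.length
  let n := l2.length
  let dp := l1.foldl (fun dp c1 => dp ++ [0 :: goA c1 l2 (dp.getLastD []) 0])
                     [List.replicate (n + 1) 0]
  (n : Int) + (m : Int) - 2 * ((dp.getLastD []).getLastD 0)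

-- ===== PORT B =====
-- val(i, j) of Source B: 0 on the border, otherwise the memo entry (none = not yet computed).
def valB (memo : PySem.Dict (Nat × Nat) Int) (i j : Nat) : Option Int :=
  if i = 0 ∨ j = 0 then some 0 else memo.get? (i, j)

-- termination weight of a work item / the stack (cited by loopB's decreasing_by)
def wEntry : Nat × Nat × Bool → Nat
  | (i, j, r) => if r then 1 else 3 ^ (i + j)

def wStack (s : List (Nat × Nat × Bool)) : Nat := (s.map wEntry).sum

theorem wexp1 (i j : Nat) (hi : i ≠ 0) (hj : j ≠ 0) :
    3 ^ (i - 1 + (j - 1)) + 1 < 3 ^ (i + j) := by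
  have e : 3 ^ (i + j) = 9 * 3 ^ (i - 1 + (j - 1)) := by
    rw [show i + j = (i - 1 + (j - 1)) + 2 from by omega, pow_add]; ring
  have h3 : 1 ≤ 3 ^ (i - 1 + (j - 1)) := Nat.one_le_pow _ _ (by omega)
  omega

theorem wexp2 (i j : Nat) (hi : i ≠ 0) (hj : j ≠ 0) :
    3 ^ (i + (j - 1)) + (3 ^ (i - 1 + j) + 1) < 3 ^ (i + j) := by
  have e1 : 3 ^ (i + j) = 3 * 3 ^ (i + (j - 1)) := by
    rw [show i + j = (i + (j - 1)) + 1 from by omega, pow_succ]; ring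
  have e2 : 3 ^ (i + j) = 3 * 3 ^ (i - 1 + j) := by
    rw [show i + j = (i - 1 + j) + 1 from by omega, pow_succ]; ring
  have h3 : 3 ≤ 3 ^ (i + (j - 1)) := by
    calc (3 : Nat) = 3 ^ 1 := by norm_num
      _ ≤ 3 ^ (i + (j - 1)) := Nat.pow_le_pow_right (by omega) (by omega)
  omega

theorem valB_isSome_ne {memo : PySem.Dict (Nat × Nat) Int} {i j : Nat}
    (h : ¬ (valB memo i j).isSome = true) : i ≠ 0 ∧ j ≠ 0 := by
  by_contra hc
  have : i = 0 ∨ j = 0 := by omega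
  simp [valB, this] at h

-- the while loop of Source B: stack head = Python's stack top (append/pop at the end)
def loopB (l1 l2 : List Char) : List (Nat × Nat × Bool) → PySem.Dict (Nat × Nat) Int →
    PySem.Dict (Nat × Nat) Int
  | [], memo => memo
  | (i, j, true) :: rest, memo =>
    if h : (valB memo i j).isSome then loopB l1 l2 rest memo
    else
      -- Python reads val(...) of the subproblems; they are computed here (the invariant
      -- proved below shows each valB is some), so .getD 0 reads exactly those values
      let v : Int :=
        if l1.getD (i - 1) ' ' = l2.getD (j - 1) ' ' then
          (valB memo (i - 1) (j - 1)).getD 0 + 1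
        else
          let a := (valB memo (i - 1) j).getD 0
          let b := (valB memo i (j - 1)).getD 0
          if a > b then a else b
      loopB l1 l2 rest (memo.insert (i, j) v)
  | (i, j, false) :: rest, memo =>
    if h : (valB memo i j).isSome then loopB l1 l2 rest memo
    else if l1.getD (i - 1) ' ' = l2.getD (j - 1) ' ' then
      loopB l1 l2 ((i - 1, j - 1, false) :: (i, j, true) :: rest) memo
    else
      loopB l1 l2 ((i, j - 1, false) :: (i - 1, j, false) :: (i, j, true) :: rest) memo
termination_by s _ => wStack s
decreasing_by
  · simp [wStack, wEntry]
  · simp [wStack, wEntry]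
  · simp [wStack, wEntry]
  · obtain ⟨hi, hj⟩ := valB_isSome_ne h
    have := wexp1 i j hi hj
    simp [wStack, wEntry] <;> omega
  · obtain ⟨hi, hj⟩ := valB_isSome_ne h
    have := wexp2 i j hi hj
    simp [wStack, wEntry] <;> omega

def lcs_distance_alt (s1 : String) (s2 : String) : Int :=
  let l1 := s1.toList
  let l2 := s2.toList
  let m := l1.length
  let n := l2.length
  let memo := loopB l1 l2 [(m, n, false)] PySem.Dict.empty
  (n : Int) + (m : Int) - 2 * (valB memo m n).getD 0

-- ===== PRECONDITION & SPEC =====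
def Spec_lcs_distance (s1 : String) (s2 : String) (out : Int) : Prop := out = lcs_distance_alt s1 s2
instance (s1 : String) (s2 : String) (out : Int) : Decidable (Spec_lcs_distance s1 s2 out) := by unfold Spec_lcs_distance; infer_instance

-- ===== CLAIM (what is proved, stated in full; the proofs are below) =====
def Claim_equal_lcs_distance : Prop := ∀ (s1 : String) (s2 : String), Dom_lcs_distance s1 s2 → Spec_lcs_distance s1 s2 (lcs_distance s1 s2)

-- ===== LEMMAS AND PROOFS =====

-- LCS length via the prefix recurrence, taking the two reversed prefixes (so the "last
-- characters" of the prefixes are the heads).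
def lcsRev : List Char → List Char → Int
  | [], _ => 0
  | _ :: _, [] => 0
  | a :: xs, b :: ys =>
      if a = b then lcsRev xs ys + 1
      else max (lcsRev xs (b :: ys)) (lcsRev (a :: xs) ys)
termination_by x y => x.length + y.length

theorem lcsRev_nil_right (x : List Char) : lcsRev x [] = 0 := by
  cases x <;> simp [lcsRev]

-- the DP row for a fixed reversed other-side prefix x: one entry per prefix of `rest`
-- extending the reversed own-side prefix `acc`.
def rowSpec (x : List Char) (acc : List Char) (rest : List Char) : List Int :=
  match rest with
  | [] => [lcsRev x acc]
  | c :: cs => lcsRev x acc :: rowSpec x (c :: acc) cs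

theorem rowSpec_zero (acc rest : List Char) :
    rowSpec [] acc rest = List.replicate (rest.length + 1) 0 := by
  induction rest generalizing acc with
  | nil => simp [rowSpec, lcsRev]
  | cons c cs ih => simp [rowSpec, lcsRev, ih, List.replicate_succ]

theorem rowSpec_head (x acc : List Char) (rest : List Char) (d : Int) :
    (rowSpec x acc rest).headD d = lcsRev x acc := by
  cases rest <;> simp [rowSpec]

theorem rowSpec_cons (x acc rest : List Char) :
    rowSpec x acc rest = lcsRev x acc :: (rowSpec x acc rest).tail := by
  cases rest <;> simp [rowSpec]

theorem rowSpec_getLast? (x : List Char) (acc rest : List Char) :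
    (rowSpec x acc rest).getLast? = some (lcsRev x (rest.reverse ++ acc)) := by
  induction rest generalizing acc with
  | nil => simp [rowSpec]
  | cons c cs ih =>
    rw [rowSpec, List.getLast?_cons, ih (c :: acc)]
    simp

theorem rowSpec_getLastD (x : List Char) (acc rest : List Char) (d : Int) :
    (rowSpec x acc rest).getLastD d = lcsRev x (rest.reverse ++ acc) := by
  simp [List.getLastD_eq_getLast?, rowSpec_getLast?]

theorem goA_spec (c1 : Char) (r1 : List Char) (rest acc : List Char) :
    goA c1 rest (rowSpec r1 acc rest) (lcsRev (c1 :: r1) acc)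
      = (rowSpec (c1 :: r1) acc rest).tail := by
  induction rest generalizing acc with
  | nil => simp [rowSpec, goA]
  | cons c2 cs ih =>
    rw [show rowSpec r1 acc (c2 :: cs) = lcsRev r1 acc :: rowSpec r1 (c2 :: acc) cs from rfl]
    rw [show (rowSpec (c1 :: r1) acc (c2 :: cs)).tail = rowSpec (c1 :: r1) (c2 :: acc) cs
      from rfl]
    simp only [goA, rowSpec_head]
    have hv : (if c1 = c2 then lcsRev r1 acc + 1
        else max (lcsRev r1 (c2 :: acc)) (lcsRev (c1 :: r1) acc))
        = lcsRev (c1 :: r1) (c2 :: acc) := by rw [lcsRev]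
    rw [hv, ih (c2 :: acc), ← rowSpec_cons]

theorem newRowA (c1 : Char) (r1 l2 : List Char) :
    0 :: goA c1 l2 (rowSpec r1 [] l2) 0 = rowSpec (c1 :: r1) [] l2 := by
  have key := goA_spec c1 r1 l2 []
  rw [lcsRev_nil_right] at key
  rw [key]
  conv_rhs => rw [rowSpec_cons (c1 :: r1) [] l2]
  rw [lcsRev_nil_right]

theorem getLastD_concat {α : Type} (l : List α) (a d : α) : (l ++ [a]).getLastD d = a := by
  induction l with
  | nil => rfl
  | cons x xs ih => cases xs <;> simp_all [List.getLastD]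

theorem foldA_spec (l2 : List Char) (l1 r1 : List Char) (dp0 : List (List Int))
    (h : dp0.getLastD [] = rowSpec r1 [] l2) :
    ((l1.foldl (fun dp c1 => dp ++ [0 :: goA c1 l2 (dp.getLastD []) 0]) dp0).getLastD [])
      = rowSpec (l1.reverse ++ r1) [] l2 := by
  induction l1 generalizing r1 dp0 with
  | nil => simpa using h
  | cons c1 cs ih =>
    simp only [List.foldl_cons, List.reverse_cons, List.append_assoc, List.singleton_append]
    exact ih (c1 :: r1) _ (by rw [getLastD_concat, h, newRowA])

-- ----- B-side spec: the LCS prefix recurrence indexed by (i, j) -----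
def Lspec (l1 l2 : List Char) : Nat → Nat → Int
  | 0, _ => 0
  | _ + 1, 0 => 0
  | i + 1, j + 1 =>
      if l1.getD i ' ' = l2.getD j ' ' then Lspec l1 l2 i j + 1
      else max (Lspec l1 l2 i (j + 1)) (Lspec l1 l2 (i + 1) j)
termination_by i j => i + j

theorem Lspec_border (l1 l2 : List Char) (i j : Nat) (h : i = 0 ∨ j = 0) :
    Lspec l1 l2 i j = 0 := by
  rcases h with h | h <;> subst h
  · simp [Lspec]
  · cases i <;> simp [Lspec]

-- memo is correct: every stored entry is the spec value of its index pair
def KnownOK (l1 l2 : List Char) (memo : PySem.Dict (Nat × Nat) Int) : Prop :=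
  ∀ p v, memo.get? p = some v → v = Lspec l1 l2 p.1 p.2

theorem valB_ok {l1 l2 : List Char} {memo : PySem.Dict (Nat × Nat) Int}
    (h : KnownOK l1 l2 memo) {i j : Nat} {v : Int} (hv : valB memo i j = some v) :
    v = Lspec l1 l2 i j := by
  unfold valB at hv
  split at hv
  · next hb => cases hv; exact (Lspec_border l1 l2 i j hb).symm
  · exact h (i, j) v hv

-- stack invariant: P = "pairs already known (or established by items processed earlier)";
-- each ready item finds its subproblems in P, and each item adds its own pair for the rest.
def InvP (l1 l2 : List Char) (P : Nat × Nat → Prop) : List (Nat × Nat × Bool) → Prop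
  | [] => True
  | (i, j, ready) :: rest =>
      (ready = true →
        if l1.getD (i - 1) ' ' = l2.getD (j - 1) ' ' then P (i - 1, j - 1)
        else P (i - 1, j) ∧ P (i, j - 1)) ∧
      InvP l1 l2 (fun p => P p ∨ p = (i, j)) rest

theorem InvP_mono (l1 l2 : List Char) (P Q : Nat × Nat → Prop) (hPQ : ∀ p, P p → Q p) :
    ∀ s, InvP l1 l2 P s → InvP l1 l2 Q s := by
  intro s
  induction s generalizing P Q with
  | nil => intro; trivial
  | cons e rest ih =>
    obtain ⟨i, j, ready⟩ := e
    intro h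
    refine ⟨fun hr => ?_, ih _ _ (fun p hp => hp.imp (hPQ p) id) h.2⟩
    have h1 := h.1 hr
    split at h1 <;> split
    · exact hPQ _ h1
    · next hc hc' => exact absurd hc hc'
    · next hc hc' => exact absurd hc' hc
    · exact ⟨hPQ _ h1.1, hPQ _ h1.2⟩

-- memo facts
theorem KnownOK_insert {l1 l2 : List Char} {memo : PySem.Dict (Nat × Nat) Int}
    (hK : KnownOK l1 l2 memo) {i j : Nat} {v : Int} (hv : v = Lspec l1 l2 i j) :
    KnownOK l1 l2 (memo.insert (i, j) v) := by
  intro p w hw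
  rw [PySem.Dict.get?_insert] at hw
  split at hw
  · next he => cases hw; rw [he, hv]
  · exact hK p w hw

theorem valB_insert_mono {memo : PySem.Dict (Nat × Nat) Int} {i j : Nat}
    (k : Nat × Nat) (v : Int) (h : (valB memo i j).isSome = true) :
    (valB (memo.insert k v) i j).isSome = true := by
  unfold valB at *
  split
  · rfl
  · next hb =>
    rw [if_neg hb] at h
    rw [PySem.Dict.get?_insert]
    split
    · rfl
    · exact h

theorem valB_insert_self {memo : PySem.Dict (Nat × Nat) Int} {i j : Nat}
    (hi : i ≠ 0) (hj : j ≠ 0) (v : Int) :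
    (valB (memo.insert (i, j) v) i j).isSome = true := by
  unfold valB
  rw [if_neg (by omega : ¬ (i = 0 ∨ j = 0)), PySem.Dict.get?_insert_self]
  rfl

theorem valB_getD {l1 l2 : List Char} {memo : PySem.Dict (Nat × Nat) Int}
    (hK : KnownOK l1 l2 memo) {i j : Nat} (h : (valB memo i j).isSome = true) :
    (valB memo i j).getD 0 = Lspec l1 l2 i j := by
  obtain ⟨w, hw⟩ := Option.isSome_iff_exists.mp h
  rw [hw, Option.getD_some]
  exact valB_ok hK hw

-- ===== main loop lemma =====
theorem loopB_spec (l1 l2 : List Char) (s : List (Nat × Nat × Bool))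
    (memo : PySem.Dict (Nat × Nat) Int) :
    KnownOK l1 l2 memo →
    InvP l1 l2 (fun p => (valB memo p.1 p.2).isSome = true) s →
    KnownOK l1 l2 (loopB l1 l2 s memo) ∧
    (∀ p : Nat × Nat, (valB memo p.1 p.2).isSome = true →
      (valB (loopB l1 l2 s memo) p.1 p.2).isSome = true) ∧
    (∀ e ∈ s, (valB (loopB l1 l2 s memo) e.1 e.2.1).isSome = true) := by
  induction s, memo using loopB.induct l1 l2 with
  | case1 memo =>
    intro hK _
    refine ⟨by simpa [loopB] using hK, fun p hp => by simpa [loopB] using hp, by simp⟩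
  | case2 i j rest memo h ih =>
    intro hK hI
    have heq : loopB l1 l2 ((i, j, true) :: rest) memo = loopB l1 l2 rest memo := by
      rw [loopB, dif_pos h]
    have hI' : InvP l1 l2 (fun p => (valB memo p.1 p.2).isSome = true) rest :=
      InvP_mono l1 l2 _ _ (fun p hp => hp.elim id (fun e => by rw [e]; exact h)) rest hI.2
    obtain ⟨c1, c2, c3⟩ := ih hK hI'
    exact ⟨by rwa [heq], fun p hp => by rw [heq]; exact c2 p hp,
      fun e he => by
        rw [heq]
        rcases List.mem_cons.mp he with rfl | he'
        · exact c2 (i, j) h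
        · exact c3 e he'⟩
  | case3 i j rest memo h _v ih =>
    intro hK hI
    obtain ⟨hi, hj⟩ := valB_isSome_ne h
    -- the computed value equals the spec value
    set v : Int :=
      (if l1.getD (i - 1) ' ' = l2.getD (j - 1) ' ' then
          (valB memo (i - 1) (j - 1)).getD 0 + 1
        else
          if (valB memo (i - 1) j).getD 0 > (valB memo i (j - 1)).getD 0 then
            (valB memo (i - 1) j).getD 0
          else (valB memo i (j - 1)).getD 0) with hv
    have hch := hI.1 rfl
    have hveq : v = Lspec l1 l2 i j := by
      obtain ⟨i', rfl⟩ : ∃ i', i = i' + 1 := ⟨i - 1, by omega⟩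
      obtain ⟨j', rfl⟩ : ∃ j', j = j' + 1 := ⟨j - 1, by omega⟩
      simp only [Nat.add_sub_cancel] at hv hch ⊢
      rw [Lspec]
      by_cases hc : l1.getD i' ' ' = l2.getD j' ' '
      · rw [if_pos hc] at hv hch ⊢
        rw [hv, valB_getD hK hch]
      · rw [if_neg hc] at hv hch ⊢
        rw [hv, valB_getD hK hch.1, valB_getD hK hch.2, max_def]
        split_ifs <;> omega
    have heq : loopB l1 l2 ((i, j, true) :: rest) memo
        = loopB l1 l2 rest (memo.insert (i, j) v) := by
      rw [loopB, dif_neg h]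
    have hK' : KnownOK l1 l2 (memo.insert (i, j) v) := KnownOK_insert hK hveq
    have hI' : InvP l1 l2
        (fun p => (valB (memo.insert (i, j) v) p.1 p.2).isSome = true) rest :=
      InvP_mono l1 l2 _ _
        (fun p hp => hp.elim (fun hp' => valB_insert_mono _ _ hp')
          (fun e => by rw [e]; exact valB_insert_self hi hj v)) rest hI.2
    obtain ⟨c1, c2, c3⟩ := ih hK' hI'
    refine ⟨by rwa [heq], fun p hp => by rw [heq]; exact c2 p (valB_insert_mono _ _ hp), ?_⟩
    intro e he
    rw [heq]
    rcases List.mem_cons.mp he with rfl | he'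
    · exact c2 (i, j) (valB_insert_self hi hj v)
    · exact c3 e he'
  | case4 i j rest memo h ih =>
    intro hK hI
    have heq : loopB l1 l2 ((i, j, false) :: rest) memo = loopB l1 l2 rest memo := by
      rw [loopB, dif_pos h]
    have hI' : InvP l1 l2 (fun p => (valB memo p.1 p.2).isSome = true) rest :=
      InvP_mono l1 l2 _ _ (fun p hp => hp.elim id (fun e => by rw [e]; exact h)) rest hI.2
    obtain ⟨c1, c2, c3⟩ := ih hK hI'
    exact ⟨by rwa [heq], fun p hp => by rw [heq]; exact c2 p hp,
      fun e he => by
        rw [heq]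
        rcases List.mem_cons.mp he with rfl | he'
        · exact c2 (i, j) h
        · exact c3 e he'⟩
  | case5 i j rest memo h hc ih =>
    intro hK hI
    have heq : loopB l1 l2 ((i, j, false) :: rest) memo
        = loopB l1 l2 ((i - 1, j - 1, false) :: (i, j, true) :: rest) memo := by
      rw [loopB, dif_neg h, if_pos hc]
    have hI' : InvP l1 l2 (fun p => (valB memo p.1 p.2).isSome = true)
        ((i - 1, j - 1, false) :: (i, j, true) :: rest) := by
      simp only [InvP]
      refine ⟨fun hf => absurd hf (by simp), fun _ => ?_, ?_⟩
      · rw [if_pos hc]; exact Or.inr trivial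
      · exact InvP_mono l1 l2 _ _
          (fun p hp => hp.elim (fun h' => Or.inl (Or.inl h')) Or.inr) rest hI.2
    obtain ⟨c1, c2, c3⟩ := ih hK hI'
    refine ⟨by rwa [heq], fun p hp => by rw [heq]; exact c2 p hp, ?_⟩
    intro e he
    rw [heq]
    rcases List.mem_cons.mp he with rfl | he'
    · exact c3 (i, j, true) (by simp)
    · exact c3 e (by simp [he'])
  | case6 i j rest memo h hc ih =>
    intro hK hI
    have heq : loopB l1 l2 ((i, j, false) :: rest) memo
        = loopB l1 l2 ((i, j - 1, false) :: (i - 1, j, false) :: (i, j, true) :: rest) memo := by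
      rw [loopB, dif_neg h, if_neg hc]
    have hI' : InvP l1 l2 (fun p => (valB memo p.1 p.2).isSome = true)
        ((i, j - 1, false) :: (i - 1, j, false) :: (i, j, true) :: rest) := by
      simp only [InvP]
      refine ⟨fun hf => absurd hf (by simp), fun hf => absurd hf (by simp), fun _ => ?_, ?_⟩
      · rw [if_neg hc]
        exact ⟨Or.inr trivial, Or.inl (Or.inr trivial)⟩
      · exact InvP_mono l1 l2 _ _
          (fun p hp => hp.elim (fun h' => Or.inl (Or.inl (Or.inl h'))) Or.inr) rest hI.2
    obtain ⟨c1, c2, c3⟩ := ih hK hI'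
    refine ⟨by rwa [heq], fun p hp => by rw [heq]; exact c2 p hp, ?_⟩
    intro e he
    rw [heq]
    rcases List.mem_cons.mp he with rfl | he'
    · exact c3 (i, j, true) (by simp)
    · exact c3 e (by simp [he'])

-- relate Lspec to lcsRev on reversed prefixes
theorem take_succ_reverse (l : List Char) (i : Nat) (h : i < l.length) :
    (l.take (i + 1)).reverse = l.getD i ' ' :: (l.take i).reverse := by
  rw [List.take_succ, List.getElem?_eq_getElem h, List.getD_eq_getElem l ' ' h]
  simp

theorem lcsRev_nil_left (y : List Char) : lcsRev [] y = 0 := by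
  cases y <;> simp [lcsRev]

theorem Lspec_eq_lcsRev (l1 l2 : List Char) (i j : Nat)
    (hi : i ≤ l1.length) (hj : j ≤ l2.length) :
    Lspec l1 l2 i j = lcsRev (l1.take i).reverse (l2.take j).reverse := by
  induction hn : i + j using Nat.strong_induction_on generalizing i j with
  | _ n ih =>
    match i, j with
    | 0, j => rw [Lspec_border l1 l2 0 j (Or.inl rfl)]; simp [lcsRev_nil_left]
    | i + 1, 0 => rw [Lspec_border l1 l2 (i + 1) 0 (Or.inr rfl)]; simp [lcsRev_nil_right]
    | i + 1, j + 1 =>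
      subst hn
      have hi' : i < l1.length := by omega
      have hj' : j < l2.length := by omega
      have e1 := take_succ_reverse l1 i hi'
      have e2 := take_succ_reverse l2 j hj'
      rw [e1, e2, Lspec, lcsRev]
      by_cases hc : l1.getD i ' ' = l2.getD j ' '
      · rw [if_pos hc, if_pos hc, ih _ (by omega) i j (by omega) (by omega) rfl]
      · rw [if_neg hc, if_neg hc,
          ih _ (by omega) i (j + 1) (by omega) (by omega) rfl,
          ih _ (by omega) (i + 1) j (by omega) (by omega) rfl, e1, e2]

-- ===== VERDICT (by name: the statement is the Claim_ definition above) =====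
theorem lcs_distance_spec : Claim_equal_lcs_distance := by
  intro s1 s2 _
  unfold Spec_lcs_distance
  show lcs_distance s1 s2 = lcs_distance_alt s1 s2
  simp only [lcs_distance, lcs_distance_alt]
  -- A's side: the last entry of the last row is lcsRev l1.reverse l2.reverse
  rw [show List.replicate (s2.toList.length + 1) (0 : Int) = rowSpec [] [] s2.toList from
    (rowSpec_zero [] s2.toList).symm]
  rw [foldA_spec s2.toList s1.toList [] _ rfl, rowSpec_getLastD]
  -- B's side: the loop computes Lspec at (m, n)
  have hK : KnownOK s1.toList s2.toList PySem.Dict.empty := by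
    intro p v hv
    rw [PySem.Dict.get?_empty] at hv
    cases hv
  have hI : InvP s1.toList s2.toList
      (fun p => (valB PySem.Dict.empty p.1 p.2).isSome = true)
      [(s1.toList.length, s2.toList.length, false)] := by
    simp only [InvP]
    exact ⟨fun hf => absurd hf (by simp), trivial⟩
  obtain ⟨c1, _, c3⟩ := loopB_spec s1.toList s2.toList
    [(s1.toList.length, s2.toList.length, false)] PySem.Dict.empty hK hI
  have hsome := c3 (s1.toList.length, s2.toList.length, false) (by simp)
  have hval := valB_getD c1 hsome
  rw [hval, Lspec_eq_lcsRev s1.toList s2.toList _ _ (le_refl _) (le_refl _),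
    List.take_length, List.take_length]
  simp
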